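-- pv_equiv track=rewrite | github.com/mirolim7/nFactorial | BigramLM/LocalFunctions.py | extract_bigrams
-- ===== SOURCE A (Python) =====
-- def extract_bigrams(names): #function for extracting bigrams from txt file
--     bigrams = []
--     for n in names:
--         for i in range(len(n)):
--             if i == 0:
--                 bigrams.append('^' + n[i]) #adding to list first letters with '^' added before them
--             else:
--                 bigrams.append(n[i - 1] + n[i]) #adding to list pair of letters
--             if i == len(n) - 1:
--                 bigrams.append(n[i] + '$') #adding to list last letters with '$' added after them
--     return bigrams
-- ===== SOURCE B (Python) =====
-- def extract_bigrams(names):  # pad each name with '^'/'$' and take one uniform sliding window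
--     bigrams = []
--     for n in names:
--         if not n:
--             continue  # the original emits nothing for an empty name
--         w = '^' + n + '$'
--         bigrams.extend(w[i:i + 2] for i in range(len(w) - 1))
--     return bigrams
-- ===== Notes on version B (the rewrite author's own statement) =====
-- stated objective: simpler
-- what changed: Replaces the index-conditional first/last handling inside the character loop by a single uniform sliding window over the padded string '^'+n+'$' (empty names skipped).
import Mathlib
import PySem

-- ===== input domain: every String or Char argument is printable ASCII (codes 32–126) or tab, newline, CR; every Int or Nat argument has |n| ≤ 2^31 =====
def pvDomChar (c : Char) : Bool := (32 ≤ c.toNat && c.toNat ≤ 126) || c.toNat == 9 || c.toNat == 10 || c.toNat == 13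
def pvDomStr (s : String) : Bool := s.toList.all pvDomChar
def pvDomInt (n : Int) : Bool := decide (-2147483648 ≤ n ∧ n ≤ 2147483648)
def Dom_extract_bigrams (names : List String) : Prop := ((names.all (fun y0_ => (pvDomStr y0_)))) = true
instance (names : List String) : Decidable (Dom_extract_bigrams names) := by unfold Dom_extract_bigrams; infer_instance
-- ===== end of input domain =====

-- B replaces A's index-conditional first/last handling by one uniform sliding window over the padded string '^'+n+'$' (simpler decomposition, same cost).

-- ===== PORT A =====
-- A-side helper: the body of "for i in range(len(n))" (indices are in range, so pyGetD's default is never used)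
def pvInnerA (n : String) (bigrams : List String) : List String :=
  (PySem.List.pyRange 0 (PySem.Str.len n) 1).foldl (fun bs i =>
    let bs2 :=
      if i = 0 then
        bs ++ [String.ofList ['^', PySem.List.pyGetD n.toList i ' ']]            -- '^' + n[i]
      else
        bs ++ [String.ofList [PySem.List.pyGetD n.toList (i - 1) ' ',
                              PySem.List.pyGetD n.toList i ' ']]                 -- n[i-1] + n[i]
    if i = PySem.Str.len n - 1 then
      bs2 ++ [String.ofList [PySem.List.pyGetD n.toList i ' ', '$']]             -- n[i] + '$'
    else bs2) bigrams

def extract_bigrams (names : List String) : List String :=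
  names.foldl (fun bigrams n => pvInnerA n bigrams) []

-- ===== PORT B =====
-- B-side helper: the loop body — skip empty names, else append all slices w[i:i+2] of the padded w
def pvInnerB (n : String) (bigrams : List String) : List String :=
  if n = "" then bigrams
  else
    bigrams ++ (PySem.List.pyRange 0 (((('^' :: n.toList ++ ['$']).length : Int)) - 1) 1).map
      (fun i => String.ofList (PySem.List.slice ('^' :: n.toList ++ ['$']) (some i) (some (i + 2))))

def extract_bigrams_alt (names : List String) : List String :=
  names.foldl (fun bigrams n => pvInnerB n bigrams) []

-- ===== PRECONDITION & SPEC =====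
def Spec_extract_bigrams (names : List String) (out : List String) : Prop := out = extract_bigrams_alt names
instance (names : List String) (out : List String) : Decidable (Spec_extract_bigrams names out) := by unfold Spec_extract_bigrams; infer_instance

-- ===== CLAIM (what is proved, stated in full; the proofs are below) =====
def Claim_equal_extract_bigrams : Prop := ∀ (names : List String), Dom_extract_bigrams names → Spec_extract_bigrams names (extract_bigrams names)

-- ===== LEMMAS AND PROOFS =====

-- the per-name segment both loop bodies append: all adjacent pairs of the padded word
def pvSeg (cs : List Char) : List String :=
  (List.range (cs.length + 1)).map
    (fun i => String.ofList (List.take 2 (List.drop i ('^' :: cs ++ ['$']))))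

-- what A's inner loop body contributes at index i
def pvG (cs : List Char) (i : Nat) : List String :=
  (if i = 0 then [String.ofList ['^', cs.getD 0 ' ']]
   else [String.ofList [cs.getD (i - 1) ' ', cs.getD i ' ']]) ++
  (if i = cs.length - 1 then [String.ofList [cs.getD i ' ', '$']] else [])

-- the per-index item shared by both sides, for i < cs.length
def pvH (cs : List Char) (i : Nat) : String :=
  if i = 0 then String.ofList ['^', cs.getD 0 ' ']
  else String.ofList [cs.getD (i - 1) ' ', cs.getD i ' ']

lemma pv_flatMap_singleton (f : Nat → String) (l : List Nat) :
    l.flatMap (fun x => [f x]) = l.map f := by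
  induction l with
  | nil => rfl
  | cons a t ih => simp only [List.flatMap_cons, List.map_cons, ih, List.singleton_append]

lemma pvH_eq_slice (cs : List Char) (i : Nat) (hi : i < cs.length) :
    pvH cs i = String.ofList (List.take 2 (List.drop i ('^' :: cs ++ ['$']))) := by
  unfold pvH
  rcases Nat.eq_zero_or_pos i with h0 | h0
  · subst h0
    rcases cs with _ | ⟨c, t⟩
    · simp at hi
    · simp
  · have hne : i ≠ 0 := Nat.pos_iff_ne_zero.mp h0
    simp only [if_neg hne]
    have h1 : i - 1 < cs.length := by omega
    have hi1 : i - 1 + 1 = i := by omega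
    have hdrop : List.drop i ('^' :: cs ++ ['$']) = List.drop (i - 1) (cs ++ ['$']) := by
      have : i = (i - 1) + 1 := by omega
      rw [this]
      simp [List.drop_succ_cons]
    have htake : List.take 2 (cs[i - 1] :: cs[i] :: (List.drop (i + 1) cs ++ ['$']))
        = [cs[i - 1], cs[i]] := rfl
    rw [hdrop, List.drop_append_of_le_length (by omega), List.drop_eq_getElem_cons h1, hi1,
        List.drop_eq_getElem_cons hi, List.cons_append, List.cons_append, htake]
    simp [hi, h1]

lemma flatMap_pvG (cs : List Char) (hcs : cs ≠ []) :
    (List.range cs.length).flatMap (pvG cs) = pvSeg cs := by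
  obtain ⟨m, hm⟩ : ∃ m, cs.length = m + 1 :=
    ⟨cs.length - 1, by have := List.length_pos_of_ne_nil hcs; omega⟩
  -- left side: pvG differs from [pvH] only at the last index
  have hsplit : (List.range cs.length).flatMap (pvG cs)
      = (List.range m).map (pvH cs) ++ pvG cs m := by
    rw [hm, List.range_succ, List.flatMap_append]
    congr 1
    · have hcong : ∀ i ∈ List.range m, pvG cs i = [pvH cs i] := by
        intro i hi
        have him : i < m := List.mem_range.mp hi
        have hne : ¬ (i = cs.length - 1) := by omega
        unfold pvG pvH
        rw [if_neg hne]
        split_ifs <;> simp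
      rw [List.flatMap_congr hcong, pv_flatMap_singleton]
    · simp
  have hmlast : m = cs.length - 1 := by omega
  have hlast : pvG cs m = [pvH cs m, String.ofList [cs.getD m ' ', '$']] := by
    unfold pvG pvH
    rw [if_pos hmlast]
    split_ifs <;> simp
  -- right side: split off the last index of pvSeg
  have hr : pvSeg cs = (List.range (m + 1 + 1)).map
      (fun i => String.ofList (List.take 2 (List.drop i ('^' :: cs ++ ['$'])))) := by
    unfold pvSeg; rw [hm]
  rw [hsplit, hlast, hr, List.range_succ, List.map_append]
  have hmem : ∀ i ∈ List.range (m + 1), pvH cs i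
      = String.ofList (List.take 2 (List.drop i ('^' :: cs ++ ['$']))) := by
    intro i hi
    exact pvH_eq_slice cs i (by have := List.mem_range.mp hi; omega)
  have hmap : (List.range (m + 1)).map (pvH cs) = (List.range (m + 1)).map
      (fun i => String.ofList (List.take 2 (List.drop i ('^' :: cs ++ ['$'])))) :=
    List.map_congr_left hmem
  -- remaining: the final singleton [c_m, '$']
  have hmc : m < cs.length := by omega
  have hdropm : List.drop (m + 1) ('^' :: cs ++ ['$']) = [cs.getD m ' ', '$'] := by
    rw [List.drop_append_of_le_length (show m + 1 ≤ ('^' :: cs).length by simp; omega),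
        List.drop_succ_cons, List.drop_eq_getElem_cons hmc]
    have hnil : List.drop (m + 1) cs = [] := List.drop_eq_nil_of_le (by omega)
    rw [hnil]
    simp [hmc]
  rw [← hmap, List.range_succ, List.map_append]
  simp only [List.map_cons, List.map_nil]
  rw [hdropm]
  simp

lemma innerA_eq (n : String) (acc : List String) :
    pvInnerA n acc = acc ++ (List.range n.toList.length).flatMap (pvG n.toList) := by
  unfold pvInnerA
  rw [PySem.Str.len_eq, PySem.List.pyRange_zero_natCast, List.foldl_map]
  refine (PySem.List.foldl_congr_mem _ _ _ _ ?_).trans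
    (PySem.List.foldl_append_eq_flatMap (pvG n.toList) _ acc)
  intro bs k hk
  have hk' : k < n.toList.length := List.mem_range.mp hk
  dsimp only
  unfold pvG
  have egetk : PySem.List.pyGetD n.toList (k : Int) ' ' = n.toList.getD k ' ' :=
    PySem.List.pyGetD_natCast _ _ _
  by_cases h0 : k = 0
  · subst h0
    rw [if_pos (show ((0 : Nat) : Int) = 0 by simp), if_pos rfl]
    by_cases hl : ((0 : Nat) : Int) = (n.toList.length : Int) - 1
    · rw [if_pos hl, if_pos (show (0 : Nat) = n.toList.length - 1 by omega), egetk]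
      simp
    · rw [if_neg hl, if_neg (show ¬ ((0 : Nat) = n.toList.length - 1) by omega), egetk]
      simp
  · have h0' : ¬ ((k : Int) = 0) := by omega
    have egetk1 : PySem.List.pyGetD n.toList ((k : Int) - 1) ' ' = n.toList.getD (k - 1) ' ' := by
      have : ((k : Int) - 1) = ((k - 1 : Nat) : Int) := by omega
      rw [this]; exact PySem.List.pyGetD_natCast _ _ _
    rw [if_neg h0', if_neg h0]
    by_cases hl : (k : Int) = (n.toList.length : Int) - 1
    · rw [if_pos hl, if_pos (show k = n.toList.length - 1 by omega), egetk, egetk1]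
      simp
    · rw [if_neg hl, if_neg (show ¬ (k = n.toList.length - 1) by omega), egetk, egetk1]
      simp

lemma innerB_eq (n : String) (acc : List String) :
    pvInnerB n acc = if n.toList = [] then acc else acc ++ pvSeg n.toList := by
  unfold pvInnerB
  by_cases h : n = ""
  · subst h
    simp
  · have hne : n.toList ≠ [] := fun hc => h (String.toList_eq_nil_iff.mp hc)
    rw [if_neg h, if_neg hne]
    congr 1
    have hlen2 : ('^' :: n.toList ++ ['$']).length = n.toList.length + 2 := by simp
    have hlen : ((('^' :: n.toList ++ ['$']).length : Int)) - 1
        = ((n.toList.length + 1 : Nat) : Int) := by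
      rw [hlen2]; push_cast; ring
    rw [hlen, PySem.List.pyRange_zero_natCast, List.map_map]
    unfold pvSeg
    apply List.map_congr_left
    intro i _
    simp only [Function.comp_apply]
    have h2 : ((i : Int) + 2) = ((i : Int) + ((2 : Nat) : Int)) := by norm_num
    rw [h2, PySem.List.slice_natCast_add]

lemma inner_eq (n : String) (acc : List String) : pvInnerA n acc = pvInnerB n acc := by
  rw [innerA_eq, innerB_eq]
  by_cases h : n.toList = []
  · rw [if_pos h, h]; simp
  · rw [if_neg h, flatMap_pvG n.toList h]

lemma fold_eq (names : List String) (acc : List String) :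
    names.foldl (fun bigrams n => pvInnerA n bigrams) acc
      = names.foldl (fun bigrams n => pvInnerB n bigrams) acc := by
  induction names generalizing acc with
  | nil => rfl
  | cons n t ih => simp only [List.foldl_cons]; rw [inner_eq]; exact ih _

-- ===== VERDICT (by name: the statement is the Claim_ definition above) =====
theorem extract_bigrams_spec : Claim_equal_extract_bigrams := by
  intro names _
  unfold Spec_extract_bigrams extract_bigrams extract_bigrams_alt
  exact fold_eq names []
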